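-- pv_equiv track=rewrite | github.com/ubccr/xdmod-value-analytics | tools/viz_samples/sankey.py | get_compute_user_count
-- ===== SOURCE A (Python) =====
-- from collections import defaultdict, Counter
--
-- def get_compute_user_count(jobs):
--     r = defaultdict(set)
--     for j in jobs:
--         r[j['CLUSTER_NAME']].add(j['USER_ID'])
--     c = Counter()
--     for k, v in r.items():
--         c[k] = len(v)
--     return c
-- ===== SOURCE B (Python) =====
-- from collections import Counter
--
-- def get_compute_user_count(jobs):
--     c = Counter()
--     for j in jobs:
--         name = j['CLUSTER_NAME']
--         if name not in c:
--             c[name] = len({k['USER_ID'] for k in jobs if k['CLUSTER_NAME'] == name})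
--     return c
-- ===== Notes on version B (the rewrite author's own statement) =====
-- stated objective: alternative
-- what changed: Drops A's global dict-of-sets dedup state entirely: B walks clusters in first-occurrence order and, for each cluster seen for the first time, rescans the whole job list to count that cluster's distinct users independently (nested scan instead of one-pass grouping).
import Mathlib
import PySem

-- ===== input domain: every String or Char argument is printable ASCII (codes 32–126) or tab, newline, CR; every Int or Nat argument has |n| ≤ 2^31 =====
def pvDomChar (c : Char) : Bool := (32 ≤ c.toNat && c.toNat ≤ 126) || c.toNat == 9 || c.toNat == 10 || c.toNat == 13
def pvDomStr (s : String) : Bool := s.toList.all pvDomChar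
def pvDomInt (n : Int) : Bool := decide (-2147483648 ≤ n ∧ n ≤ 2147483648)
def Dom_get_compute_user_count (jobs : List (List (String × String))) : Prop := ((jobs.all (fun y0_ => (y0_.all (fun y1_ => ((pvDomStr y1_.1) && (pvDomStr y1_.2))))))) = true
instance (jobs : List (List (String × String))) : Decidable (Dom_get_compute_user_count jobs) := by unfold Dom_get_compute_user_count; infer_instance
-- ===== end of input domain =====

-- B drops A's global dict-of-sets grouping state: it walks clusters in first-occurrence order and,
-- for each cluster seen for the first time, rescans the whole job list to count that cluster's
-- distinct users independently (alternative nested-scan algorithm; not faster).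

-- shared accessors for j['CLUSTER_NAME'] / j['USER_ID'] (first-match association-list lookup;
-- Pre_ guarantees the keys are present, so `.getD ""` never supplies its default)
def pvCluster (j : List (String × String)) : String := (j.lookup "CLUSTER_NAME").getD ""
def pvUser (j : List (String × String)) : String := (j.lookup "USER_ID").getD ""

-- ===== PORT A =====
-- A: r = defaultdict(set); r[j['CLUSTER_NAME']].add(j['USER_ID']); then c[k] = len(v) for k, v in r.items().
def get_compute_user_count (jobs : List (List (String × String))) : List (String × Int) :=
  let r : PySem.Dict String (PySem.Set String) :=
    jobs.foldl (fun r j =>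
      r.insert (pvCluster j)
        (PySem.Set.add (r.getD (pvCluster j) PySem.Set.empty) (pvUser j))) PySem.Dict.empty
  let c : PySem.Dict String Int :=
    r.items.foldl (fun c kv => c.insert kv.1 ((kv.2.length : Int))) PySem.Dict.empty
  c.items

-- ===== PORT B =====
-- B: for each job, if its cluster is not yet a key of the Counter, count that cluster's distinct
-- users by a fresh scan of the whole list: c[name] = len({k['USER_ID'] for k in jobs if k['CLUSTER_NAME'] == name}).
def get_compute_user_count_alt (jobs : List (List (String × String))) : List (String × Int) :=
  (jobs.foldl (fun c j =>
      if c.contains (pvCluster j) then c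
      else c.insert (pvCluster j)
        (((PySem.Set.ofList ((jobs.filter (fun k => pvCluster k == pvCluster j)).map pvUser)).length : Int)))
    (PySem.Dict.empty : PySem.Dict String Int)).items

-- ===== PRECONDITION & SPEC =====
-- Pre_ excludes only jobs missing the 'CLUSTER_NAME' or 'USER_ID' key, on which Python A raises KeyError.
def Pre_get_compute_user_count (jobs : List (List (String × String))) : Prop :=
  ∀ j ∈ jobs, (j.lookup "CLUSTER_NAME").isSome ∧ (j.lookup "USER_ID").isSome
instance (jobs : List (List (String × String))) : Decidable (Pre_get_compute_user_count jobs) := by unfold Pre_get_compute_user_count; infer_instance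
def pvWitness_get_compute_user_count : (List (List (String × String))) :=
  [[("CLUSTER_NAME", "a"), ("USER_ID", "1")], [("CLUSTER_NAME", "a"), ("USER_ID", "2")]]

def Spec_get_compute_user_count (jobs : List (List (String × String))) (out : List (String × Int)) : Prop := out = get_compute_user_count_alt jobs
instance (jobs : List (List (String × String))) (out : List (String × Int)) : Decidable (Spec_get_compute_user_count jobs out) := by unfold Spec_get_compute_user_count; infer_instance

-- ===== CLAIM (what is proved, stated in full; the proofs are below) =====
def Claim_equal_get_compute_user_count : Prop := ∀ (jobs : List (List (String × String))), Dom_get_compute_user_count jobs → Pre_get_compute_user_count jobs → Spec_get_compute_user_count jobs (get_compute_user_count jobs)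

-- ===== LEMMAS AND PROOFS =====

-- the distinct clusters of jobs, in first-occurrence order
def pvFO (jobs : List (List (String × String))) : PySem.Set String :=
  PySem.Set.ofList (jobs.map pvCluster)

-- the distinct users of cluster c among jobs, in first-occurrence order
def pvS (jobs : List (List (String × String))) (c : String) : PySem.Set String :=
  PySem.Set.ofList ((jobs.filter (fun k => pvCluster k == c)).map pvUser)

-- A's grouping fold, named for the lemmas
def pvGather (jobs : List (List (String × String))) : PySem.Dict String (PySem.Set String) :=
  jobs.foldl (fun r j =>
    r.insert (pvCluster j)
      (PySem.Set.add (r.getD (pvCluster j) PySem.Set.empty) (pvUser j))) PySem.Dict.empty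

theorem pvFO_append (jobs : List (List (String × String))) (j : List (String × String)) :
    pvFO (jobs ++ [j]) = PySem.Set.add (pvFO jobs) (pvCluster j) := by
  simp [pvFO, PySem.Set.ofList_eq_foldl, List.foldl_append]

theorem pvS_append (jobs : List (List (String × String))) (j : List (String × String)) (c : String) :
    pvS (jobs ++ [j]) c =
      if pvCluster j = c then PySem.Set.add (pvS jobs c) (pvUser j) else pvS jobs c := by
  by_cases h : pvCluster j = c <;>
    simp [pvS, List.filter_append, h, PySem.Set.ofList_eq_foldl, List.foldl_append]

theorem pvS_empty_of_not_mem (jobs : List (List (String × String))) (c : String)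
    (h : c ∉ jobs.map pvCluster) : pvS jobs c = PySem.Set.empty := by
  have hfil : jobs.filter (fun k => pvCluster k == c) = [] := by
    rw [List.filter_eq_nil_iff]
    intro k hk hkc
    exact h (List.mem_map.mpr ⟨k, hk, by simpa using hkc⟩)
  simp [pvS, hfil, PySem.Set.ofList]

-- A's first pass characterised: items of the grouping dict are exactly the clusters in
-- first-occurrence order, each with its set of distinct users in first-occurrence order.
theorem pvGather_items (jobs : List (List (String × String))) :
    (pvGather jobs).items = (pvFO jobs).map (fun c => (c, pvS jobs c)) := by
  induction jobs using List.reverseRecOn with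
  | nil => rfl
  | append_singleton jobs j ih =>
    have hkeys : (pvGather jobs).keys = pvFO jobs := by
      simp only [PySem.Dict.keys, ih, List.map_map]
      exact List.map_id _
    have hnd : (pvGather jobs).keys.Nodup := by
      rw [hkeys]; exact PySem.Set.nodup_ofList _
    have hstep : pvGather (jobs ++ [j]) =
        (pvGather jobs).insert (pvCluster j)
          (PySem.Set.add ((pvGather jobs).getD (pvCluster j) PySem.Set.empty) (pvUser j)) := by
      simp [pvGather, List.foldl_append]
    have hcont : (pvGather jobs).contains (pvCluster j)
        = decide (pvCluster j ∈ pvFO jobs) := by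
      rw [PySem.Dict.contains_eq_decide_mem_keys, hkeys]
    by_cases hmem : pvCluster j ∈ pvFO jobs
    · -- cluster already present: insert updates in place, the one entry gains the user
      have hget : (pvGather jobs).getD (pvCluster j) PySem.Set.empty = pvS jobs (pvCluster j) := by
        refine PySem.Dict.getD_of_mem_items _ ?_ hnd _
        rw [ih]
        exact List.mem_map.mpr ⟨pvCluster j, hmem, rfl⟩
      rw [hstep, PySem.Dict.items_insert_of_contains _ _ (by simp [hcont, hmem]), ih, hget,
          pvFO_append, PySem.Set.add_of_mem hmem, List.map_map]
      refine List.map_congr_left fun c hc => ?_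
      by_cases hcc : c = pvCluster j
      · subst hcc; simp [pvS_append]
      · have : ¬ (pvCluster j = c) := fun h => hcc h.symm
        simp [hcc, pvS_append, this]
    · -- fresh cluster: insert appends, and its user set so far is empty
      have hnm : pvCluster j ∉ jobs.map pvCluster := fun h =>
        hmem ((PySem.Set.mem_ofList _ _).mpr h)
      rw [hstep, PySem.Dict.items_insert_of_not_contains _ _ (by simp [hcont, hmem]), ih,
          PySem.Dict.getD_of_not_contains _ _ (by simp [hcont, hmem]),
          pvFO_append, PySem.Set.add_of_not_mem hmem, List.map_append]
      congr 1
      · refine List.map_congr_left fun c hc => ?_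
        have hcc : ¬ (pvCluster j = c) := fun h => by
          rw [← h] at hc; exact hmem hc
        simp [pvS_append, hcc]
      · simp [pvS_append, pvS_empty_of_not_mem jobs _ hnm]

-- A's second pass over r.items inserts pairwise-distinct fresh keys into an empty dict, so it is
-- exactly the pointwise map to set sizes.
theorem pv_second_pass (r : PySem.Dict String (PySem.Set String)) (hnd : r.keys.Nodup) :
    (r.items.foldl (fun c kv => c.insert kv.1 ((kv.2.length : Int))) PySem.Dict.empty).items
      = r.items.map (fun kv => (kv.1, (kv.2.length : Int))) := by
  have h := PySem.Dict.items_foldl_insert_fresh r.items (fun kv => kv.1)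
    (fun kv => ((kv.2.length : Int))) PySem.Dict.empty
    (fun a _ => PySem.Dict.contains_empty _) (by simpa [PySem.Dict.keys] using hnd)
  simpa using h

-- B's fold characterised: starting from a dict whose items are `seen` (already-handled clusters,
-- each with its full-list distinct-user count), folding over `rest` extends `seen` by the fresh
-- clusters of `rest` in first-occurrence order.
theorem pvAlt_fold (jobs : List (List (String × String))) :
    ∀ (rest : List (List (String × String))) (seen : PySem.Set String) (d : PySem.Dict String Int),
      d.items = seen.map (fun c => (c, ((pvS jobs c).length : Int))) →
      (rest.foldl (fun c j =>
          if c.contains (pvCluster j) then c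
          else c.insert (pvCluster j)
            (((PySem.Set.ofList ((jobs.filter (fun k => pvCluster k == pvCluster j)).map pvUser)).length : Int))) d).items
        = (rest.foldl (fun s j => PySem.Set.add s (pvCluster j)) seen).map
            (fun c => (c, ((pvS jobs c).length : Int))) := by
  intro rest
  induction rest with
  | nil => intro seen d h; simpa using h
  | cons j rest ih =>
    intro seen d h
    have hkeys : d.keys = seen := by
      simp only [PySem.Dict.keys, h, List.map_map]
      exact List.map_id _
    have hcont : d.contains (pvCluster j) = decide (pvCluster j ∈ seen) := by
      rw [PySem.Dict.contains_eq_decide_mem_keys, hkeys]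
    by_cases hmem : pvCluster j ∈ seen
    · simp only [List.foldl_cons]
      rw [if_pos (by simp [hcont, hmem]), PySem.Set.add_of_mem hmem]
      exact ih seen d h
    · simp only [List.foldl_cons]
      rw [if_neg (by simp [hcont, hmem]), PySem.Set.add_of_not_mem hmem]
      refine ih (seen ++ [pvCluster j]) _ ?_
      rw [PySem.Dict.items_insert_of_not_contains _ _ (by simp [hcont, hmem]), h, List.map_append]
      rfl

-- ===== VERDICT (by name: the statement is the Claim_ definition above) =====
theorem get_compute_user_count_spec : Claim_equal_get_compute_user_count := by
  intro jobs _ _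
  unfold Spec_get_compute_user_count get_compute_user_count get_compute_user_count_alt
  simp only []
  have hA : (pvGather jobs).items = (pvFO jobs).map (fun c => (c, pvS jobs c)) := pvGather_items jobs
  have hnd : (pvGather jobs).keys.Nodup := by
    have : (pvGather jobs).keys = pvFO jobs := by
      simp only [PySem.Dict.keys, hA, List.map_map]
      exact List.map_id _
    rw [this]; exact PySem.Set.nodup_ofList _
  have hB := pvAlt_fold jobs jobs PySem.Set.empty PySem.Dict.empty (by rfl)
  have hfo : jobs.foldl (fun s j => PySem.Set.add s (pvCluster j)) PySem.Set.empty = pvFO jobs := by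
    rw [pvFO, PySem.Set.ofList_eq_foldl, List.foldl_map]; rfl
  show ((pvGather jobs).items.foldl (fun c kv => c.insert kv.1 ((kv.2.length : Int))) PySem.Dict.empty).items
      = _
  rw [pv_second_pass _ hnd, hA, hB, hfo, List.map_map]
  rfl
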